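-- pv_equiv track=rewrite | github.com/PinkBlure/AP-Exercises | Python_Recurrencia/solve.py | solve
-- ===== SOURCE A (Python) =====
-- def solve(p, q):
--     mem = {}
--
--     def getKey(p, q):
--         return str(p) + "-" + str(q)
--
--     def autoSum(p, q):
--         value = 0
--
--         for k in range(p, q):
--             value += (t(p, k) + t(k + 1, q))
--
--         return value
--
--     def t(p, q):
--         key = getKey(p, q)
--
--         if key not in mem:
--             if p == q:
--                 r = 1
--             else:
--                 r = max(
--                     t(p + 1, q),
--                     autoSum(p, q)
--                 )
--             mem[key] = r
--
--         return mem[key]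
--
--     return t(p, q)
-- ===== SOURCE B (Python) =====
-- def solve(p, q):
--     # closed form of the interval recurrence: f(p,p)=1, f(p,q)=2*3^(q-p-1) for p<q
--     return 1 if p == q else 2 * 3 ** (q - p - 1)
-- ===== Notes on version B (the rewrite author's own statement) =====
-- stated objective: faster
-- what changed: Replaced the memoized interval recurrence t(p,q)=max(t(p+1,q), sum_k t(p,k)+t(k+1,q)) by its proved closed form 1 if p==q else 2*3^(q-p-1); intended as faster (O(n^3) -> one pow): a timing run measured B 49.89x at the largest size both finished and A timing out at n=256 where B returned, but could not confirm the label on enough inputs.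
import Mathlib
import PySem

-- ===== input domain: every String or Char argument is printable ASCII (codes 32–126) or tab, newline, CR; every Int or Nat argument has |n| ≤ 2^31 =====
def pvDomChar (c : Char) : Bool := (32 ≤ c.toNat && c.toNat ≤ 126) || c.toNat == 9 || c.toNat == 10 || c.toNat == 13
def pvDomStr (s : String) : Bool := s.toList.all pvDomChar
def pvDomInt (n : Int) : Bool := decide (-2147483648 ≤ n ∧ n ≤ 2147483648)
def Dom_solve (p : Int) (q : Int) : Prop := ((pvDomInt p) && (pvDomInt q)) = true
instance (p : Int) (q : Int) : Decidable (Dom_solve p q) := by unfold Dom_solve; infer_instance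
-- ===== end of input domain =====

-- B replaces A's memoized interval recurrence by its proved closed form 1 / 2*3^(q-p-1)
-- (intended as faster; a timing run measured B 49.89x at the largest size both programs
-- finished, with A timing out beyond that, but could not confirm the label on enough inputs).

-- ===== PORT A =====
-- Python: getKey(p, q) = str(p) + "-" + str(q).  String concatenation is represented
-- over List Char (exact: PySem.Int.toChars n = str(n)).
def getKeyA (p : Int) (q : Int) : List Char :=
  PySem.Int.toChars p ++ '-' :: PySem.Int.toChars q

-- Python's nested `t` / `autoSum` share the memo dict `mem`; the ports thread it through
-- as state.  `fuel` only makes the mutual recursion structurally terminating: under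
-- Pre_solve (p ≤ q) the initial fuel (q-p).toNat + 1 is never exhausted, since every
-- recursive call of `t` strictly shrinks the gap q - p.
mutual
def tA (fuel : Nat) (mem : PySem.Dict (List Char) Int) (p : Int) (q : Int) :
    Int × PySem.Dict (List Char) Int :=
  match fuel with
  | 0 => (0, mem)   -- unreachable under Pre_solve (Python: unbounded recursion when p > q)
  | f + 1 =>
    let key := getKeyA p q
    if mem.contains key then
      (mem.getD key 0, mem)                      -- return mem[key] (key present)
    else
      let r :=
        if p = q then (1, mem)
        else
          let a := tA f mem (p + 1) q            -- t(p + 1, q)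
          let s := autoSumA f a.2 p q            -- autoSum(p, q)
          (max a.1 s.1, s.2)
      let mem2 := r.2.insert key r.1             -- mem[key] = r
      (mem2.getD key 0, mem2)                    -- return mem[key]
  termination_by 2 * fuel
  decreasing_by all_goals omega

def autoSumA (fuel : Nat) (mem : PySem.Dict (List Char) Int) (p : Int) (q : Int) :
    Int × PySem.Dict (List Char) Int :=
  (PySem.List.pyRange p q 1).foldl
    (fun acc k =>
      let x := tA fuel acc.2 p k                 -- t(p, k)
      let y := tA fuel x.2 (k + 1) q             -- t(k + 1, q)
      (acc.1 + (x.1 + y.1), y.2))                -- value += t(p, k) + t(k + 1, q)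
    (0, mem)
  termination_by 2 * fuel + 1
  decreasing_by all_goals omega
end

def solve (p : Int) (q : Int) : Int :=
  (tA ((q - p).toNat + 1) PySem.Dict.empty p q).1

-- ===== PORT B =====
-- Python B: `1 if p == q else 2 * 3 ** (q - p - 1)`.  Under Pre_solve (p ≤ q) the
-- exponent is nonnegative, so `.toNat` is exact.
def solve_alt (p : Int) (q : Int) : Int :=
  if p = q then 1 else 2 * 3 ^ (q - p - 1).toNat

-- ===== PRECONDITION & SPEC =====
-- Pre_solve excludes p > q, where Python A never terminates (RecursionError) and
-- Python B's `3 ** negative` is a float, not an int.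
def Pre_solve (p : Int) (q : Int) : Prop := p ≤ q
instance (p : Int) (q : Int) : Decidable (Pre_solve p q) := by unfold Pre_solve; infer_instance
def pvWitness_solve : Int × Int := (2, 5)

def Spec_solve (p : Int) (q : Int) (out : Int) : Prop := out = solve_alt p q
instance (p : Int) (q : Int) (out : Int) : Decidable (Spec_solve p q out) := by unfold Spec_solve; infer_instance

-- ===== CLAIM (what is proved, stated in full; the proofs are below) =====
def Claim_equal_solve : Prop := ∀ (p : Int) (q : Int), Dom_solve p q → Pre_solve p q → Spec_solve p q (solve p q)

-- ===== LEMMAS AND PROOFS =====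

-- the value t(p, q) computes, as a function of the gap (q - p).toNat
def Fg (n : Nat) : Int := if n = 0 then 1 else 2 * 3 ^ (n - 1)

-- the partial sums accumulated by autoSum: Tg d m = Σ over the last m loop iterations,
-- where d = (current k) - p and m = q - (current k)
def Tg : Nat → Nat → Int
  | _, 0 => 0
  | d, m + 1 => Fg d + Fg m + Tg (d + 1) m

-- decimal representation of a Nat, the shape Nat.toDigits reduces to
def decRep (n : Nat) : List Char :=
  if h : n / 10 = 0 then [Nat.digitChar (n % 10)]
  else decRep (n / 10) ++ [Nat.digitChar (n % 10)]
  termination_by n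
  decreasing_by exact Nat.div_lt_self (by omega) (by omega)

-- the memo invariant: every cached value under a key of the form getKey a b is correct
def InvA (mem : PySem.Dict (List Char) Int) : Prop :=
  ∀ (a b v : Int), a ≤ b → mem.get? (getKeyA a b) = some v → v = Fg (b - a).toNat

theorem digitChar_toNat (m : Nat) (h : m < 10) : (Nat.digitChar m).toNat = m + 48 := by
  interval_cases m <;> decide

theorem digitChar_ne_dash (m : Nat) (h : m < 10) : Nat.digitChar m ≠ '-' := by
  interval_cases m <;> decide

theorem toDigitsCore_eq_decRep (f : Nat) :
    ∀ (n : Nat) (acc : List Char), n < f →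
      Nat.toDigitsCore 10 f n acc = decRep n ++ acc := by
  induction f with
  | zero => intro n acc h; omega
  | succ f ih =>
    intro n acc h
    rw [Nat.toDigitsCore, decRep]
    by_cases h10 : n / 10 = 0
    · simp [h10]
    · simp only [h10]
      rw [ih (n / 10) _ (by have := Nat.div_lt_self (by omega : 0 < n) (by omega : 1 < 10); omega)]
      simp

theorem decRep_ne_nil (n : Nat) : decRep n ≠ [] := by
  rw [decRep]; split <;> simp

theorem decRep_digits (n : Nat) : ∀ c ∈ decRep n, c ≠ '-' := by
  induction n using decRep.induct with
  | case1 n h =>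
    rw [decRep, dif_pos h]
    intro c hc
    simp at hc
    subst hc
    exact digitChar_ne_dash _ (Nat.mod_lt _ (by omega))
  | case2 n h ih =>
    rw [decRep, dif_neg h]
    intro c hc
    rcases List.mem_append.1 hc with h1 | h1
    · exact ih c h1
    · simp at h1; subst h1; exact digitChar_ne_dash _ (Nat.mod_lt _ (by omega))

theorem parse_decRep (n : Nat) :
    (decRep n).foldl (fun a c => 10 * a + (c.toNat - 48)) 0 = n := by
  induction n using decRep.induct with
  | case1 n h =>
    rw [decRep, dif_pos h]
    simp [digitChar_toNat _ (Nat.mod_lt _ (by omega))]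
    omega
  | case2 n h ih =>
    rw [decRep, dif_neg h]
    rw [List.foldl_append, ih]
    simp [digitChar_toNat _ (Nat.mod_lt _ (by omega))]
    omega

theorem decRep_inj (m n : Nat) (h : decRep m = decRep n) : m = n := by
  have := parse_decRep m
  rw [h, parse_decRep] at this
  omega

theorem toChars_eq (n : Int) :
    PySem.Int.toChars n = if n < 0 then '-' :: decRep n.natAbs else decRep n.toNat := by
  unfold PySem.Int.toChars Nat.toDigits
  rw [toDigitsCore_eq_decRep _ _ _ (Nat.lt_succ_self _),
      toDigitsCore_eq_decRep _ _ _ (Nat.lt_succ_self _)]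
  simp

theorem toChars_ne_nil (n : Int) : PySem.Int.toChars n ≠ [] := by
  rw [toChars_eq]; split <;> simp [decRep_ne_nil]

theorem toChars_tail_ne_dash (n : Int) : ∀ c ∈ (PySem.Int.toChars n).tail, c ≠ '-' := by
  rw [toChars_eq]
  split
  · simpa using decRep_digits n.natAbs
  · intro c hc
    exact decRep_digits n.toNat c (List.mem_of_mem_tail hc)

theorem toChars_inj (m n : Int) (h : PySem.Int.toChars m = PySem.Int.toChars n) : m = n := by
  rw [toChars_eq, toChars_eq] at h
  by_cases hm : m < 0 <;> by_cases hn : n < 0 <;> simp [hm, hn] at h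
  · have := decRep_inj _ _ h; omega
  · exact absurd rfl (decRep_digits n.toNat '-' (by rw [← h]; simp))
  · exact absurd rfl (decRep_digits m.toNat '-' (by rw [h]; simp))
  · have := decRep_inj _ _ h; omega

-- no toChars contains '-' past position 0, so the separator position is forced
theorem key_split_aux (u v : Int) (Bu Qv : List Char)
    (heq : PySem.Int.toChars u ++ '-' :: Bu = PySem.Int.toChars v ++ '-' :: Qv)
    (hlt : (PySem.Int.toChars u).length < (PySem.Int.toChars v).length) : False := by
  obtain ⟨j, hj⟩ : ∃ j, (PySem.Int.toChars u).length = j + 1 := by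
    obtain ⟨a, t, hU⟩ := List.exists_cons_of_ne_nil (toChars_ne_nil u)
    exact ⟨t.length, by rw [hU]; simp⟩
  have h1 : (PySem.Int.toChars u ++ '-' :: Bu)[j + 1]? = some '-' := by
    rw [← hj, List.getElem?_append_right (le_refl _)]
    simp
  rw [heq] at h1
  rw [List.getElem?_append_left (by omega)] at h1
  obtain ⟨a, t, hV⟩ := List.exists_cons_of_ne_nil (toChars_ne_nil v)
  rw [hV, List.getElem?_cons_succ] at h1
  have hmem : '-' ∈ (PySem.Int.toChars v).tail := by
    rw [hV, List.tail_cons]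
    exact List.mem_of_getElem? h1
  exact toChars_tail_ne_dash v _ hmem rfl

theorem key_split_len (x y : Int) (B Q : List Char)
    (h : PySem.Int.toChars x ++ '-' :: B = PySem.Int.toChars y ++ '-' :: Q) :
    (PySem.Int.toChars x).length = (PySem.Int.toChars y).length := by
  rcases Nat.lt_trichotomy (PySem.Int.toChars x).length (PySem.Int.toChars y).length with hlt | he | hgt
  · exact absurd (key_split_aux x y B Q h hlt) (by simp)
  · exact he
  · exact absurd (key_split_aux y x Q B h.symm hgt) (by simp)

theorem getKeyA_inj (a b p q : Int) (h : getKeyA a b = getKeyA p q) : a = p ∧ b = q := by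
  unfold getKeyA at h
  have hlen := key_split_len a p _ _ h
  have := List.append_inj h hlen
  refine ⟨toChars_inj _ _ this.1, toChars_inj _ _ (by injection this.2)⟩

-- closed forms of the autoSum partial sums
theorem Tg_pos (m d : Nat) : Tg (d + 1) (m + 1) = 3 ^ (d + m + 1) - 3 ^ d + 3 ^ m := by
  induction m generalizing d with
  | zero =>
    show Fg (d + 1) + Fg 0 + Tg (d + 2) 0 = _
    simp [Fg, Tg, pow_succ]
    ring_nf
  | succ m ih =>
    show Fg (d + 1) + Fg (m + 1) + Tg (d + 2) (m + 1) = _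
    rw [show d + 2 = (d + 1) + 1 from rfl, ih (d + 1)]
    simp only [Fg, if_neg (Nat.succ_ne_zero d), if_neg (Nat.succ_ne_zero m),
      Nat.add_sub_cancel]
    rw [show d + 1 + m + 1 = d + m + 2 from by omega,
        show d + (m + 1) + 1 = d + m + 2 from by omega,
        pow_succ 3 d, pow_succ 3 m]
    ring

theorem Tg_zero (m : Nat) : Tg 0 (m + 1) = 2 * 3 ^ m := by
  cases m with
  | zero => simp [Tg, Fg]
  | succ m =>
    show Fg 0 + Fg (m + 1) + Tg 1 (m + 1) = _
    rw [show (1 : Nat) = 0 + 1 from rfl, Tg_pos m 0]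
    simp only [Fg, if_neg (Nat.succ_ne_zero m), Nat.add_sub_cancel]
    rw [show 0 + m + 1 = m + 1 from by omega, pow_succ 3 m]
    ring_nf
    norm_num

theorem Fg_le (m : Nat) : Fg m ≤ 2 * 3 ^ m := by
  cases m with
  | zero => simp [Fg]
  | succ m =>
    simp only [Fg, if_neg (Nat.succ_ne_zero m), Nat.add_sub_cancel, pow_succ]
    have : (0 : Int) < 3 ^ m := by positivity
    nlinarith

theorem InvA_empty : InvA PySem.Dict.empty := by
  intro a b v _ h
  simp [PySem.Dict.get?_empty] at h

theorem InvA_insert (mem : PySem.Dict (List Char) Int) (p q : Int) (hpq : p ≤ q)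
    (hmem : InvA mem) : InvA (mem.insert (getKeyA p q) (Fg (q - p).toNat)) := by
  intro a b v hab hget
  rw [PySem.Dict.get?_insert] at hget
  split at hget
  · rename_i heq
    obtain ⟨rfl, rfl⟩ := getKeyA_inj _ _ _ _ heq
    exact (Option.some_inj.1 hget).symm
  · exact hmem a b v hab hget

-- main loop invariant: with enough fuel and a correct memo, t(p, q) returns Fg (q-p)
-- and preserves the memo invariant
theorem tA_correct (fuel : Nat) :
    ∀ (p q : Int) (mem : PySem.Dict (List Char) Int), (q - p).toNat < fuel → p ≤ q →
      InvA mem → (tA fuel mem p q).1 = Fg (q - p).toNat ∧ InvA (tA fuel mem p q).2 := by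
  induction fuel with
  | zero => intro p q mem h; omega
  | succ f ih =>
    intro p q mem hfuel hpq hmem
    -- the autoSum fold, with the induction hypothesis available for fuel f
    have fold_lemma : ∀ (g : Nat) (j : Int) (mem' : PySem.Dict (List Char) Int) (acc : Int),
        p ≤ j → j ≤ q → (q - j).toNat = g → (q - p).toNat ≤ f → InvA mem' →
        (((PySem.List.pyRange j q 1).foldl
          (fun acc k =>
            let x := tA f acc.2 p k
            let y := tA f x.2 (k + 1) q
            (acc.1 + (x.1 + y.1), y.2))
          (acc, mem'))).1 = acc + Tg (j - p).toNat (q - j).toNat ∧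
        InvA (((PySem.List.pyRange j q 1).foldl
          (fun acc k =>
            let x := tA f acc.2 p k
            let y := tA f x.2 (k + 1) q
            (acc.1 + (x.1 + y.1), y.2))
          (acc, mem'))).2 := by
      intro g
      induction g with
      | zero =>
        intro j mem' acc hpj hjq hg _ hmem'
        have hjq' : q ≤ j := by omega
        rw [PySem.List.pyRange_one_eq_nil hjq']
        simp only [List.foldl_nil]
        rw [hg]
        exact ⟨by simp [Tg], hmem'⟩
      | succ g ihg =>
        intro j mem' acc hpj hjq hg hqp hmem'
        have hjq' : j < q := by omega
        rw [PySem.List.pyRange_one_cons hjq']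
        simp only [List.foldl_cons]
        have hx := ih p j mem' (by omega) hpj hmem'
        set x := tA f mem' p j with hxdef
        have hy := ih (j + 1) q x.2 (by omega) (by omega) hx.2
        set y := tA f x.2 (j + 1) q with hydef
        have := ihg (j + 1) y.2 (acc + (x.1 + y.1)) (by omega) (by omega) (by omega) hqp hy.2
        refine ⟨?_, this.2⟩
        rw [this.1, hx.1, hy.1]
        have h1 : (q - j).toNat = (q - (j + 1)).toNat + 1 := by omega
        rw [h1]
        show acc + (Fg (j - p).toNat + Fg (q - (j + 1)).toNat) + Tg ((j + 1) - p).toNat (q - (j + 1)).toNat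
            = acc + (Fg (j - p).toNat + Fg (q - (j + 1)).toNat + Tg ((j - p).toNat + 1) (q - (j + 1)).toNat)
        have h2 : ((j + 1) - p).toNat = (j - p).toNat + 1 := by omega
        rw [h2]; ring
    -- now the body of t
    rw [tA]
    by_cases hc : mem.contains (getKeyA p q)
    · simp only [hc, if_true]
      have hsome : (mem.get? (getKeyA p q)).isSome := by
        rw [← PySem.Dict.contains_eq_isSome_get?, hc]
      rcases Option.isSome_iff_exists.1 hsome with ⟨v, hv⟩
      refine ⟨?_, hmem⟩
      rw [PySem.Dict.getD_eq_get?_getD, hv]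
      exact hmem p q v hpq hv
    · simp only [hc, if_false, Bool.false_eq_true]
      by_cases hpq' : p = q
      · subst hpq'
        simp only [if_true]
        have h0 : (p - p).toNat = 0 := by omega
        constructor
        · rw [PySem.Dict.getD_insert_self, h0]
          simp [Fg]
        · have h1 : (1 : Int) = Fg (p - p).toNat := by rw [h0]; simp [Fg]
          rw [h1]
          exact InvA_insert mem p p (le_refl _) hmem
      · simp only [if_neg hpq']
        have hplt : p < q := lt_of_le_of_ne hpq hpq'
        have ha := ih (p + 1) q mem (by omega) (by omega) hmem
        have hs := fold_lemma (q - p).toNat p (tA f mem (p + 1) q).2 0 (le_refl _) hpq rfl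
          (by omega) ha.2
        have hg1 : (q - p).toNat = (q - (p + 1)).toNat + 1 := by omega
        have hval : max (tA f mem (p + 1) q).1 (autoSumA f (tA f mem (p + 1) q).2 p q).1
            = Fg (q - p).toNat := by
          rw [autoSumA, hs.1, ha.1, zero_add]
          have h0 : (p - p).toNat = 0 := by omega
          rw [h0, hg1, Tg_zero]
          have hle : Fg (q - (p + 1)).toNat ≤ 2 * 3 ^ (q - (p + 1)).toNat := Fg_le _
          have hFg : Fg ((q - (p + 1)).toNat + 1) = 2 * 3 ^ (q - (p + 1)).toNat := by
            simp [Fg]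
          rw [hFg]
          omega
        have hinv : InvA (autoSumA f (tA f mem (p + 1) q).2 p q).2 := by
          rw [autoSumA]
          exact hs.2
        constructor
        · rw [PySem.Dict.getD_insert_self, hval]
        · rw [hval]
          exact InvA_insert _ p q hpq hinv

-- closed form of B's port in terms of Fg
theorem solve_alt_eq_Fg (p q : Int) (h : p ≤ q) : solve_alt p q = Fg (q - p).toNat := by
  unfold solve_alt Fg
  by_cases hpq : p = q
  · subst hpq; simp
  · have h1 : (q - p).toNat ≠ 0 := by omega
    have h2 : (q - p - 1).toNat = (q - p).toNat - 1 := by omega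
    simp [hpq, h1, h2]

-- ===== VERDICT (by name: the statement is the Claim_ definition above) =====
theorem solve_spec : Claim_equal_solve := by
  intro p q _ hpre
  unfold Spec_solve solve
  have := tA_correct ((q - p).toNat + 1) p q PySem.Dict.empty (by omega) hpre InvA_empty
  rw [this.1, solve_alt_eq_Fg p q hpre]
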